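-- pv_equiv track=rewrite | github.com/tsenying/EPIJudge | epi_judge_python/nearest_repeated_entries.py | find_nearest_repetition
-- ===== SOURCE A (Python) =====
-- def find_nearest_repetition(paragraph):
--     # TODO - you fill in here.
--     # Option 1.
--     # build hash table of words as keys and values as list of positions for each word
--     # find least difference between positions, return word and distance
--     #
--     # Option 2.
--     # maintain hash table of word keys with values keeping last seen index
--     # for each word calculate distance to last seen,
--     #  if less than current shortest, then update shortest
--     shortest = float('inf')
--     words_last_index = {}
--     for i, word in enumerate(paragraph):
--         if word not in words_last_index:
--             words_last_index[word] = i
--         else: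
--             distance = i - words_last_index[word]
--             if distance < shortest:
--                 shortest = distance
--             words_last_index[word] = i
--     return shortest if shortest != float('inf') else -1
-- ===== SOURCE B (Python) =====
-- def find_nearest_repetition(paragraph):
--     # Phase 1: group all occurrence indices by word.
--     positions = {}
--     for i, word in enumerate(paragraph):
--         positions.setdefault(word, []).append(i)
--     # Phase 2: for each word, the nearest pair is a consecutive pair of indices.
--     shortest = float('inf')
--     for pos in positions.values():
--         for prev, cur in zip(pos, pos[1:]):
--             gap = cur - prev
--             if gap < shortest:
--                 shortest = gap
--     return shortest if shortest != float('inf') else -1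
-- ===== Notes on version B (the rewrite author's own statement) =====
-- stated objective: alternative
-- what changed: Replaces A's single online pass keeping a last-seen-index dict and a running minimum with a two-phase algorithm: first build a word -> list-of-occurrence-indices dict, then scan each position list's consecutive pairs for the smallest gap.
import Mathlib
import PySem

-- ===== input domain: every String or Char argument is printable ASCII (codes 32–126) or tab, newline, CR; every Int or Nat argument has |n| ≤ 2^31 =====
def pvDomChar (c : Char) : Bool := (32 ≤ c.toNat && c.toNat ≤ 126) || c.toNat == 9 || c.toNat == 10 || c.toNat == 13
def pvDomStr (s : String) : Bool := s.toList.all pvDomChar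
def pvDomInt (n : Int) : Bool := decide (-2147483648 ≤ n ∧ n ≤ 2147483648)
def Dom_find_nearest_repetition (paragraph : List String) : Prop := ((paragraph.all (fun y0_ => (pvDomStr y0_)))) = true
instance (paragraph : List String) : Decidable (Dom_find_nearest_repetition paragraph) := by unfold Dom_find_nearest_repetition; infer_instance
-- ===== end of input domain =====

-- B replaces A's single online pass (last-seen-index dict + running minimum) by a two-phase
-- algorithm: group all occurrence indices per word, then scan consecutive pairs of each
-- position list (objective: alternative decomposition; same asymptotic cost).

-- ===== PORT A =====
-- Python's float('inf') sentinel is represented as `none`; `distance < shortest` is always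
-- true while shortest is still the sentinel, exactly as in the Python.
def pvAUpd (shortest : Option Int) (distance : Int) : Option Int :=
  match shortest with
  | none => some distance
  | some s => if distance < s then some distance else some s

def pvALoop (l : List (Int × String)) (shortest : Option Int)
    (words_last_index : PySem.Dict String Int) : Option Int :=
  match l with
  | [] => shortest
  | (i, word) :: rest =>
    match words_last_index.get? word with
    | none => pvALoop rest shortest (words_last_index.insert word i)
    | some j => pvALoop rest (pvAUpd shortest (i - j)) (words_last_index.insert word i)

def find_nearest_repetition (paragraph : List String) : Int :=
  match pvALoop (PySem.List.enumerate paragraph) none PySem.Dict.empty with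
  | some s => s
  | none => -1

-- ===== PORT B =====
-- Phase 1: positions.setdefault(word, []).append(i)  =  Dict.modify word [] (· ++ [i]).
def pvBBuild (paragraph : List String) : PySem.Dict String (List Int) :=
  (PySem.List.enumerate paragraph).foldl
    (fun positions iw => positions.modify iw.2 [] (· ++ [iw.1])) PySem.Dict.empty

def pvBUpd (shortest : Option Int) (gap : Int) : Option Int :=
  match shortest with
  | none => some gap
  | some s => if gap < s then some gap else some s

-- Phase 2 inner loop: `for prev, cur in zip(pos, pos[1:])`; pos[1:] = List.drop 1 (exact
-- for a nonnegative slice start).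
def pvBScanWord (shortest : Option Int) (pos : List Int) : Option Int :=
  (pos.zip (pos.drop 1)).foldl (fun sh pc => pvBUpd sh (pc.2 - pc.1)) shortest

def find_nearest_repetition_alt (paragraph : List String) : Int :=
  match (pvBBuild paragraph).values.foldl pvBScanWord none with
  | some s => s
  | none => -1

-- ===== PRECONDITION & SPEC =====
def Spec_find_nearest_repetition (paragraph : List String) (out : Int) : Prop := out = find_nearest_repetition_alt paragraph
instance (paragraph : List String) (out : Int) : Decidable (Spec_find_nearest_repetition paragraph out) := by unfold Spec_find_nearest_repetition; infer_instance

-- ===== CLAIM (what is proved, stated in full; the proofs are below) =====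
def Claim_equal_find_nearest_repetition : Prop := ∀ (paragraph : List String), Dom_find_nearest_repetition paragraph → Spec_find_nearest_repetition paragraph (find_nearest_repetition paragraph)

-- ===== LEMMAS AND PROOFS =====

-- the consecutive gaps of one word's position list
def pvWgaps (pos : List Int) : List Int :=
  (pos.zip (pos.drop 1)).map (fun pc => pc.2 - pc.1)

-- the gaps A's loop feeds to its running minimum, in chronological order
def pvGapsA (l : List (Int × String)) (d : PySem.Dict String Int) : List Int :=
  match l with
  | [] => []
  | (i, word) :: rest =>
    match d.get? word with
    | none => pvGapsA rest (d.insert word i)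
    | some j => (i - j) :: pvGapsA rest (d.insert word i)

lemma pvALoop_eq_foldl (l : List (Int × String)) (sh : Option Int)
    (d : PySem.Dict String Int) : pvALoop l sh d = (pvGapsA l d).foldl pvAUpd sh := by
  induction l generalizing sh d with
  | nil => rfl
  | cons iw rest ih =>
    obtain ⟨i, word⟩ := iw
    cases h : d.get? word <;> simp [pvALoop, pvGapsA, h, ih]

lemma pvBScanWord_eq (sh : Option Int) (pos : List Int) :
    pvBScanWord sh pos = (pvWgaps pos).foldl pvBUpd sh := by
  simp [pvBScanWord, pvWgaps, List.foldl_map]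

lemma pvBScan_eq (vals : List (List Int)) (sh : Option Int) :
    vals.foldl pvBScanWord sh = ((vals.map pvWgaps).flatten).foldl pvBUpd sh := by
  induction vals generalizing sh with
  | nil => rfl
  | cons pos vals ih => simp [pvBScanWord_eq, List.foldl_append, ih]

lemma pvBUpd_eq_pvAUpd : pvBUpd = pvAUpd := rfl

lemma pvAUpd_some (s g : Int) : pvAUpd (some s) g = some (min g s) := by
  simp only [pvAUpd]
  split_ifs <;> simp only [Option.some.injEq] <;> omega

lemma pvAUpd_rcomm (sh : Option Int) (a b : Int) :
    pvAUpd (pvAUpd sh a) b = pvAUpd (pvAUpd sh b) a := by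
  cases sh with
  | none =>
    rw [show pvAUpd none a = some a from rfl, show pvAUpd none b = some b from rfl,
      pvAUpd_some, pvAUpd_some]
    simp only [Option.some.injEq]; omega
  | some s => simp only [pvAUpd_some, Option.some.injEq]; omega

lemma pvWgaps_cons_cons (a b : Int) (t : List Int) :
    pvWgaps (a :: b :: t) = (b - a) :: pvWgaps (b :: t) := rfl

lemma pvWgaps_concat (ps : List Int) (j i : Int) (h : ps.getLast? = some j) :
    pvWgaps (ps ++ [i]) = pvWgaps ps ++ [i - j] := by
  induction ps with
  | nil => simp at h
  | cons a t ih =>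
    cases t with
    | nil =>
      simp only [List.getLast?_singleton, Option.some.injEq] at h
      subst h; rfl
    | cons b t2 =>
      have h2 : (b :: t2).getLast? = some j := by
        rwa [List.getLast?_cons_cons] at h
      have ht := ih h2
      simp only [List.cons_append] at ht ⊢
      rw [pvWgaps_cons_cons, pvWgaps_cons_cons, ht]
      simp

-- replacing the (unique) entry with key w by appending one gap moves that gap to the end,
-- up to permutation
lemma pvSurgery (i j : Int) (w : String) (ps : List Int)
    (L : List (String × List Int)) (hnd : (L.map (·.1)).Nodup) (hmem : (w, ps) ∈ L)
    (hps : ps.getLast? = some j) :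
    ((L.map (fun q => if q.1 == w then (w, ps ++ [i]) else q)).map
      (fun q => pvWgaps q.2)).flatten.Perm
      (((L.map (fun q => pvWgaps q.2)).flatten) ++ [i - j]) := by
  induction L with
  | nil => simp at hmem
  | cons q L ih =>
    simp only [List.map_cons, List.nodup_cons] at hnd
    obtain ⟨hq, hndL⟩ := hnd
    rcases List.mem_cons.mp hmem with hmem | hmem
    · -- the head is the entry with key w
      obtain rfl := hmem.symm
      have hq' : w ∉ L.map (fun q => q.1) := hq
      have hLid : L.map (fun r => if r.1 == w then (w, ps ++ [i]) else r) = L := by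
        rw [List.map_congr_left (g := id), List.map_id]
        intro r hr
        have hrne : r.1 ≠ w := by
          intro hrw
          exact hq' (by
            simpa [hrw] using
              List.mem_map_of_mem (f := fun q : String × List Int => q.1) hr)
        simp [hrne]
      simp only [List.map_cons, BEq.rfl, if_pos, List.flatten_cons, hLid,
        pvWgaps_concat ps j i hps]
      rw [List.append_assoc, List.append_assoc]
      exact List.Perm.append_left _ (List.perm_append_comm)
    · -- the head has a different key
      have hqw : q.1 ≠ w := by
        intro hrw
        exact hq (hrw ▸ List.mem_map_of_mem hmem)
      have htail := ih hndL hmem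
      have hbq : (q.1 == w) = false := by simpa using hqw
      have hqid : (if (q.1 == w) = true then (w, ps ++ [i]) else q) = q := by
        simp [hbq]
      simp only [List.map_cons, hqid, List.flatten_cons]
      rw [List.append_assoc]
      exact List.Perm.append_left _ htail

lemma pvKey (l : List (Int × String)) (p : PySem.Dict String (List Int))
    (d : PySem.Dict String Int) (hnd : p.keys.Nodup)
    (hlast : ∀ w, d.get? w = (p.get? w).bind List.getLast?)
    (hne : ∀ w ps, p.get? w = some ps → ps ≠ []) :
    (((l.foldl (fun p iw => p.modify iw.2 [] (· ++ [iw.1])) p).values.map pvWgaps).flatten).Perm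
      (((p.values.map pvWgaps).flatten) ++ pvGapsA l d) := by
  induction l generalizing p d with
  | nil => simp [pvGapsA]
  | cons iw rest ih =>
    obtain ⟨i, w⟩ := iw
    simp only [List.foldl_cons]
    have hmod : p.modify w [] (· ++ [i]) = p.insert w (p.getD w [] ++ [i]) := rfl
    cases hc : p.get? w with
    | none =>
      have hdw : d.get? w = none := by rw [hlast w, hc]; rfl
      have hcont : p.contains w = false := by
        rw [PySem.Dict.contains_eq_isSome_get?, hc]; rfl
      have hgd : p.getD w [] = [] := by
        rw [PySem.Dict.getD_eq_get?_getD, hc]; rfl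
      have hstep : p.modify w [] (· ++ [i]) = p.insert w [i] := by
        rw [hmod, hgd]; rfl
      have hGA : pvGapsA ((i, w) :: rest) d = pvGapsA rest (d.insert w i) := by
        simp [pvGapsA, hdw]
      have hih := ih (p.insert w [i]) (d.insert w i)
        (PySem.Dict.nodup_keys_insert p w [i] hnd)
        (by
          intro w'
          by_cases hw : w' = w
          · subst hw; simp
          · simp [PySem.Dict.get?_insert, hw, hlast w'])
        (by
          intro w' ps' h'
          by_cases hw : w' = w
          · subst hw; rw [PySem.Dict.get?_insert] at h'; simp at h'
            rw [← h']; simp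
          · rw [PySem.Dict.get?_insert] at h'; rw [if_neg hw] at h'
            exact hne w' ps' h')
      have hv : (p.insert w [i]).values = p.values ++ [[i]] := by
        simp [PySem.Dict.values, PySem.Dict.items_insert_of_not_contains p [i] hcont]
      rw [hstep, hGA]
      refine hih.trans ?_
      rw [hv]
      simp [List.flatten_append, show pvWgaps [i] = [] from rfl]
    | some ps =>
      have hne0 : ps ≠ [] := hne w ps hc
      cases hgl : ps.getLast? with
      | none => exact absurd (List.getLast?_eq_none_iff.mp hgl) hne0
      | some j =>
        have hdw : d.get? w = some j := by rw [hlast w, hc]; simpa using hgl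
        have hcont : p.contains w = true := by
          rw [PySem.Dict.contains_eq_isSome_get?, hc]; rfl
        have hgd : p.getD w [] = ps := by
          rw [PySem.Dict.getD_eq_get?_getD, hc]; rfl
        have hstep : p.modify w [] (· ++ [i]) = p.insert w (ps ++ [i]) := by
          rw [hmod, hgd]
        have hGA : pvGapsA ((i, w) :: rest) d = (i - j) :: pvGapsA rest (d.insert w i) := by
          simp [pvGapsA, hdw]
        have hih := ih (p.insert w (ps ++ [i])) (d.insert w i)
          (PySem.Dict.nodup_keys_insert p w (ps ++ [i]) hnd)
          (by
            intro w'
            by_cases hw : w' = w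
            · subst hw; simp
            · simp [PySem.Dict.get?_insert, hw, hlast w'])
          (by
            intro w' ps' h'
            by_cases hw : w' = w
            · subst hw; rw [PySem.Dict.get?_insert] at h'; simp at h'
              rw [← h']; simp
            · rw [PySem.Dict.get?_insert] at h'; rw [if_neg hw] at h'
              exact hne w' ps' h')
        have hnd' : (p.items.map (·.1)).Nodup := by
          simpa [PySem.Dict.keys] using hnd
        have hmem : (w, ps) ∈ p.items := PySem.Dict.mem_items_of_get?_eq_some p hc
        have hsurg := pvSurgery i j w ps p.items hnd' hmem hgl
        have hvals : ((p.insert w (ps ++ [i])).values.map pvWgaps).flatten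
            = ((p.items.map (fun q => if q.1 == w then (w, ps ++ [i]) else q)).map
                (fun q => pvWgaps q.2)).flatten := by
          simp [PySem.Dict.values, PySem.Dict.items_insert_of_contains p (ps ++ [i]) hcont,
            List.map_map, Function.comp_def]
        have hvals2 : (p.values.map pvWgaps).flatten
            = (p.items.map (fun q => pvWgaps q.2)).flatten := by
          simp [PySem.Dict.values, List.map_map, Function.comp_def]
        rw [hstep, hGA]
        refine hih.trans ?_
        rw [hvals]
        refine hsurg.append_right _ |>.trans ?_
        rw [List.append_assoc, hvals2]
        exact List.Perm.refl _

-- ===== VERDICT (by name: the statement is the Claim_ definition above) =====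
theorem find_nearest_repetition_spec : Claim_equal_find_nearest_repetition := by
  intro paragraph _
  unfold Spec_find_nearest_repetition
  have hperm := pvKey (PySem.List.enumerate paragraph) PySem.Dict.empty PySem.Dict.empty
    (by simp) (by intro w; simp) (by intro w ps h; simp at h)
  rw [show (PySem.Dict.empty : PySem.Dict String (List Int)).values = [] from rfl] at hperm
  simp only [List.map_nil, List.flatten_nil, List.nil_append] at hperm
  have hfold : ((pvBBuild paragraph).values.map pvWgaps).flatten.foldl pvAUpd none
      = (pvGapsA (PySem.List.enumerate paragraph) PySem.Dict.empty).foldl pvAUpd none :=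
    List.Perm.foldl_eq (rcomm := ⟨fun b a₁ a₂ => pvAUpd_rcomm b a₁ a₂⟩) hperm none
  unfold find_nearest_repetition find_nearest_repetition_alt
  rw [pvALoop_eq_foldl, pvBScan_eq, pvBUpd_eq_pvAUpd, hfold]
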